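-- pv_equiv track=rewrite | github.com/Python-AI-Solutions/agentic-neurodata-conversion | backend/src/agents/adaptive_retry.py | _format_issues_summary
-- ===== SOURCE A (Python) =====
-- from typing import Any
--
-- def _format_issues_summary(issues: list[dict[str, Any]]) -> str:
--     """Format issues into readable summary for LLM."""
--     if not issues:
--         return "No issues"
--
--     # Group by severity
--     by_severity: dict[str, list[dict[str, Any]]] = {}
--     for issue in issues[:20]:  # Limit to first 20
--         severity = issue.get("severity", "UNKNOWN")
--         if severity not in by_severity:
--             by_severity[severity] = []
--         by_severity[severity].append(issue)
--
--     lines = []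
--     for severity, severity_issues in sorted(by_severity.items()):
--         lines.append(f"\n{severity} ({len(severity_issues)} issues):")
--         for issue in severity_issues[:5]:  # Show first 5 per severity
--             lines.append(f"  - {issue.get('message', 'No message')}")
--
--     if len(issues) > 20:
--         lines.append(f"\n... and {len(issues) - 20} more issues")
--
--     return "\n".join(lines)
-- ===== SOURCE B (Python) =====
-- from typing import Any
--
-- def _format_issues_summary(issues: list[dict[str, Any]]) -> str:
--     """Format issues into readable summary for LLM (sort-then-group-runs)."""
--     if not issues:
--         return "No issues"
--
--     # Stable sort of the first 20 by severity, then walk consecutive runs.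
--     head = sorted(issues[:20], key=lambda i: i.get("severity", "UNKNOWN"))
--
--     lines = []
--     i = 0
--     while i < len(head):
--         severity = head[i].get("severity", "UNKNOWN")
--         j = i
--         while j < len(head) and head[j].get("severity", "UNKNOWN") == severity:
--             j += 1
--         group = head[i:j]
--         lines.append(f"\n{severity} ({len(group)} issues):")
--         for issue in group[:5]:
--             lines.append(f"  - {issue.get('message', 'No message')}")
--         i = j
--
--     if len(issues) > 20:
--         lines.append(f"\n... and {len(issues) - 20} more issues")
--
--     return "\n".join(lines)
-- ===== Notes on version B (the rewrite author's own statement) =====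
-- stated objective: alternative
-- what changed: Replaces A's severity->list dict accumulation (then sorted(items)) by a stable sort of issues[:20] on severity followed by a single walk over consecutive equal-severity runs; the empty-guard and '... and N more issues' tail are kept.
import Mathlib
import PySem

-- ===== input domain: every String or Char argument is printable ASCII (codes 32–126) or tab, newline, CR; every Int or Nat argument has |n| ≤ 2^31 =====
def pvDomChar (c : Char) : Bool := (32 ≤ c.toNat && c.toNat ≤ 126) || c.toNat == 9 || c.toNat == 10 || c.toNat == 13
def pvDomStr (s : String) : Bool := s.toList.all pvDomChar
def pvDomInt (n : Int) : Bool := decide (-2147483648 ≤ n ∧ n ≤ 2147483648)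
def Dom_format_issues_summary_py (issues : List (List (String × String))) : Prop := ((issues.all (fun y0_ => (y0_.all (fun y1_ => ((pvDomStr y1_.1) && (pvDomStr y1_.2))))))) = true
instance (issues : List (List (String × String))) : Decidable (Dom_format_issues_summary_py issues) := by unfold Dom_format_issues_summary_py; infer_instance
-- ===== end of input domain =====

-- ===== PORT A =====
-- B re-groups by sorting the first-20 slice by severity and walking consecutive runs,
-- instead of A's severity->list dict; same output, alternative decomposition (return value only; no mutation).

-- issue.get("severity", "UNKNOWN") / issue.get("message", "No message") on the issue dict
def pvSev (x : List (String × String)) : String :=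
  PySem.Dict.getD (PySem.Dict.mk x) "severity" "UNKNOWN"

def pvMsg (x : List (String × String)) : String :=
  PySem.Dict.getD (PySem.Dict.mk x) "message" "No message"

def format_issues_summary_py (issues : List (List (String × String))) : String :=
  if issues = [] then "No issues"
  else
    -- for issue in issues[:20]: group by severity
    let bySev := (PySem.List.slice issues none (some 20)).foldl
      (fun d issue =>
        let severity := pvSev issue
        let d := if d.contains severity then d else d.insert severity []
        d.insert severity (d.getD severity [] ++ [issue]))
      PySem.Dict.empty
    -- sorted(by_severity.items()): the keys are distinct, so Python's tuple
    -- comparison only ever inspects the severity component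
    let lines := (PySem.List.sorted bySev.items (fun p => p.1)).foldl
      (fun lines p =>
        let lines := lines ++ ["\n" ++ p.1 ++ " (" ++ PySem.Int.toStr (p.2.length : Int) ++ " issues):"]
        (PySem.List.slice p.2 none (some 5)).foldl
          (fun lines issue => lines ++ ["  - " ++ pvMsg issue]) lines)
      []
    let lines := if (20 : Int) < (issues.length : Int) then
        lines ++ ["\n... and " ++ PySem.Int.toStr ((issues.length : Int) - 20) ++ " more issues"]
      else lines
    PySem.Str.join "\n" lines

-- ===== PORT B =====
-- the two while-loops of Source B: split the sorted list into maximal runs of equal severity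
def pvRuns (l : List (List (String × String))) : List (String × List (List (String × String))) :=
  match l with
  | [] => []
  | x :: xs =>
    (pvSev x, x :: xs.takeWhile (fun y => pvSev y == pvSev x))
      :: pvRuns (xs.dropWhile (fun y => pvSev y == pvSev x))
termination_by l.length
decreasing_by
  have := List.length_dropWhile_le (p := fun y => pvSev y == pvSev x) (l := xs)
  simp; omega

def format_issues_summary_py_alt (issues : List (List (String × String))) : String :=
  if issues = [] then "No issues"
  else
    -- head = sorted(issues[:20], key=severity)  (stable)
    let head := PySem.List.sorted (PySem.List.slice issues none (some 20)) pvSev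
    let lines := (pvRuns head).foldl
      (fun lines p =>
        let lines := lines ++ ["\n" ++ p.1 ++ " (" ++ PySem.Int.toStr (p.2.length : Int) ++ " issues):"]
        (PySem.List.slice p.2 none (some 5)).foldl
          (fun lines issue => lines ++ ["  - " ++ pvMsg issue]) lines)
      []
    let lines := if (20 : Int) < (issues.length : Int) then
        lines ++ ["\n... and " ++ PySem.Int.toStr ((issues.length : Int) - 20) ++ " more issues"]
      else lines
    PySem.Str.join "\n" lines

-- ===== PRECONDITION & SPEC =====
def Spec_format_issues_summary_py (issues : List (List (String × String))) (out : String) : Prop := out = format_issues_summary_py_alt issues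
instance (issues : List (List (String × String))) (out : String) : Decidable (Spec_format_issues_summary_py issues out) := by unfold Spec_format_issues_summary_py; infer_instance

-- ===== CLAIM (what is proved, stated in full; the proofs are below) =====
def Claim_equal_format_issues_summary_py : Prop := ∀ (issues : List (List (String × String))), Dom_format_issues_summary_py issues → Spec_format_issues_summary_py issues (format_issues_summary_py issues)

-- ===== LEMMAS AND PROOFS =====

lemma pv_step_eq_modify (d : PySem.Dict String (List (List (String × String)))) (x : List (String × String)) :
    (let severity := pvSev x
     let d := if d.contains severity then d else d.insert severity []
     d.insert severity (d.getD severity [] ++ [x]))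
    = d.modify (pvSev x) [] (· ++ [x]) := by
  simp only [PySem.Dict.modify]
  by_cases h : d.contains (pvSev x)
  · simp [h]
  · simp only [h, Bool.false_eq_true, if_false]
    rw [PySem.Dict.getD_insert_self, PySem.Dict.insert_insert_self,
        PySem.Dict.getD_of_not_contains d [] (by simpa using h)]

lemma pv_discard_of_not_mem {s : List String} {a : String} (h : a ∉ s) :
    PySem.Set.discard s a = s := by
  rw [PySem.Set.discard, List.filter_eq_self]
  intro y hy
  simp only [Bool.not_eq_true', beq_eq_false_iff_ne, ne_eq]
  exact fun e => h (e ▸ hy)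

lemma pv_ofList_sublist (xs : List String) : (PySem.Set.ofList xs).Sublist xs := by
  induction xs with
  | nil => simp [PySem.Set.ofList, PySem.Set.empty]
  | cons x t ih =>
    rw [PySem.Set.ofList_cons]
    refine List.Sublist.cons₂ x ?_
    exact (List.filter_sublist.trans ih)

lemma pv_discard_ofList_append (l1 l2 : List String) (a : String) (h : ∀ y ∈ l1, y = a) :
    (PySem.Set.ofList (l1 ++ l2)).discard a = (PySem.Set.ofList l2).discard a := by
  induction l1 with
  | nil => simp
  | cons b t ih =>
    have hb : b = a := h b (by simp)
    subst hb
    rw [List.cons_append, PySem.Set.ofList_cons]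
    have : ∀ y ∈ t, y = b := fun y hy => h y (by simp [hy])
    rw [← ih this]
    simp [PySem.Set.discard, List.filter_filter]

lemma pv_dict_items (l : List (List (String × String))) :
    (l.foldl (fun d issue =>
        let severity := pvSev issue
        let d := if d.contains severity then d else d.insert severity []
        d.insert severity (d.getD severity [] ++ [issue])) PySem.Dict.empty).items
    = (PySem.Set.ofList (l.map pvSev)).map
        (fun s => (s, l.filter (fun x => pvSev x == s))) := by
  have hstep : (fun (d : PySem.Dict String (List (List (String × String)))) issue =>
        let severity := pvSev issue
        let d := if d.contains severity then d else d.insert severity []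
        d.insert severity (d.getD severity [] ++ [issue]))
      = fun d issue => d.modify (pvSev issue) [] (· ++ [issue]) := by
    funext d issue; exact pv_step_eq_modify d issue
  rw [hstep]
  set D := l.foldl (fun d issue => d.modify (pvSev issue) [] (· ++ [issue])) PySem.Dict.empty with hD
  have hkeys : D.keys = PySem.Set.ofList (l.map pvSev) := by
    rw [hD, PySem.Dict.keys_foldl_modify_key l pvSev [] (fun _ issue v => v ++ [issue])]
    show PySem.Set.update ([] : List String) (List.map pvSev l) = _
    exact PySem.Set.update_nil_left _
  have hnodup : D.keys.Nodup := by
    rw [hD]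
    exact PySem.Dict.nodup_keys_foldl_modify_key l pvSev [] _ _ PySem.Dict.nodup_keys_empty
  rw [PySem.Dict.items_eq_map_keys D hnodup [], hkeys]
  apply List.map_congr_left
  intro s _
  congr 1
  -- D.getD s [] = l.filter (pvSev = s)
  have : D = (l.map (fun x => (pvSev x, x))).foldl
      (fun d p => d.modify p.1 [] (· ++ [p.2])) PySem.Dict.empty := by
    rw [hD, List.foldl_map]
  rw [this, PySem.Dict.getD_foldl_modify_append]
  rw [List.filter_map]
  simp [Function.comp_def]

lemma pv_filter_insertBy (c : String) (x : List (String × String))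
    (acc : List (List (String × String)))
    (h : acc.Pairwise (fun a b => pvSev a ≤ pvSev b)) :
    (PySem.List.insertBy (fun a b => decide (pvSev a < pvSev b)) x acc).filter (fun y => pvSev y == c)
    = if pvSev x == c then acc.filter (fun y => pvSev y == c) ++ [x]
      else acc.filter (fun y => pvSev y == c) := by
  induction acc with
  | nil => simp [PySem.List.insertBy]; split <;> simp_all
  | cons y t ih =>
    rw [PySem.List.insertBy]
    by_cases hlt : pvSev x < pvSev y
    · simp only [hlt, decide_true, if_true]
      by_cases hc : pvSev x == c
      · -- all of y :: t has severity ≥ pvSev y > pvSev x = c, so filter (y::t) = []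
        have hxc : pvSev x = c := by simpa using hc
        have hempty : (y :: t).filter (fun z => pvSev z == c) = [] := by
          rw [List.filter_eq_nil_iff]
          intro z hz
          have : pvSev y ≤ pvSev z := by
            rcases List.mem_cons.mp hz with h' | h'
            · rw [h']
            · exact (List.pairwise_cons.mp h).1 z h'
          simp only [beq_iff_eq]
          intro e
          exact absurd (lt_of_lt_of_le hlt this) (by rw [e, hxc]; exact lt_irrefl c)
        rw [if_pos hc, List.filter_cons_of_pos (by simpa using hc), hempty]
        rfl
      · simp only [hc, Bool.false_eq_true, if_false]
        rw [List.filter_cons_of_neg (by simpa using hc)]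
    · simp only [hlt, decide_false, Bool.false_eq_true, if_false]
      have ht : t.Pairwise (fun a b => pvSev a ≤ pvSev b) := (List.pairwise_cons.mp h).2
      by_cases hyc : pvSev y == c
      · rw [List.filter_cons_of_pos (by simpa using hyc),
            List.filter_cons_of_pos (by simpa using hyc), ih ht]
        split <;> simp
      · rw [List.filter_cons_of_neg (by simpa using hyc),
            List.filter_cons_of_neg (by simpa using hyc), ih ht]

lemma pv_filter_sorted (l : List (List (String × String))) (c : String) :
    (PySem.List.sorted l pvSev).filter (fun y => pvSev y == c)
    = l.filter (fun y => pvSev y == c) := by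
  induction l using List.reverseRecOn with
  | nil => simp [PySem.List.sorted_eq_foldl_insertBy]
  | append_singleton t x ih =>
    rw [PySem.List.sorted_eq_foldl_insertBy, List.foldl_append, List.foldl_cons, List.foldl_nil,
        ← PySem.List.sorted_eq_foldl_insertBy]
    rw [pv_filter_insertBy c x _ (PySem.List.sorted_pairwise t pvSev), List.filter_append]
    by_cases hc : (pvSev x == c) = true
    · rw [if_pos hc]; simp [ih, hc]
    · rw [if_neg hc]; simp [ih, hc]

lemma pv_key_dropWhile (x : List (String × String)) (xs : List (List (String × String)))
    (hle : ∀ y ∈ xs, pvSev x ≤ pvSev y)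
    (hp : xs.Pairwise (fun a b => pvSev a ≤ pvSev b)) :
    ∀ y ∈ xs.dropWhile (fun y => pvSev y == pvSev x), pvSev x < pvSev y := by
  induction xs with
  | nil => simp
  | cons a t ih =>
    by_cases ha : (pvSev a == pvSev x) = true
    · simp only [List.dropWhile_cons, if_pos ha]
      exact ih (fun y hy => hle y (by simp [hy])) (List.pairwise_cons.mp hp).2
    · simp only [List.dropWhile_cons, if_neg ha]
      have hax : pvSev x < pvSev a :=
        lt_of_le_of_ne (hle a (by simp)) (fun e => ha (by simp [e.symm]))
      intro y hy
      rcases List.mem_cons.mp hy with h' | h'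
      · rw [h']; exact hax
      · exact lt_of_lt_of_le hax ((List.pairwise_cons.mp hp).1 y h')

lemma pv_runs_eq (ys : List (List (String × String)))
    (h : ys.Pairwise (fun a b => pvSev a ≤ pvSev b)) :
    pvRuns ys = (PySem.Set.ofList (ys.map pvSev)).map
        (fun s => (s, ys.filter (fun x => pvSev x == s))) := by
  induction ys using pvRuns.induct with
  | case1 => simp [pvRuns, PySem.Set.ofList, PySem.Set.empty]
  | case2 x xs ih =>
    have hle : ∀ y ∈ xs, pvSev x ≤ pvSev y := (List.pairwise_cons.mp h).1
    have hpxs : xs.Pairwise (fun a b => pvSev a ≤ pvSev b) := (List.pairwise_cons.mp h).2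
    set q := fun y => pvSev y == pvSev x with hq
    have hxs : xs.takeWhile q ++ xs.dropWhile q = xs := List.takeWhile_append_dropWhile
    have hr : ∀ y ∈ xs.takeWhile q, pvSev y = pvSev x := by
      intro y hy
      have h' := List.mem_takeWhile_imp (p := q) (l := xs) hy
      simpa [hq] using h'
    have hrest_gt : ∀ y ∈ xs.dropWhile q, pvSev x < pvSev y := pv_key_dropWhile x xs hle hpxs
    have hrest_p : (xs.dropWhile q).Pairwise (fun a b => pvSev a ≤ pvSev b) :=
      hpxs.sublist (List.dropWhile_sublist q)
    rw [pvRuns, ih hrest_p]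
    -- RHS key set
    rw [List.map_cons, PySem.Set.ofList_cons]
    have hmapxs : xs.map pvSev = (xs.takeWhile q).map pvSev ++ (xs.dropWhile q).map pvSev := by
      rw [← List.map_append, hxs]
    have hset : (PySem.Set.ofList (xs.map pvSev)).discard (pvSev x)
        = PySem.Set.ofList ((xs.dropWhile q).map pvSev) := by
      rw [hmapxs, pv_discard_ofList_append _ _ _ (by
        intro y hy
        rcases List.mem_map.mp hy with ⟨z, hz, rfl⟩
        exact hr z hz)]
      apply pv_discard_of_not_mem
      intro hmem
      rcases List.mem_map.mp ((PySem.Set.mem_ofList _ _).mp hmem) with ⟨z, hz, he⟩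
      exact absurd he.symm (ne_of_gt (hrest_gt z hz)).symm
    rw [hset, List.map_cons]
    have h1 : (xs.takeWhile q).filter (fun z => pvSev z == pvSev x) = xs.takeWhile q :=
      List.filter_eq_self.mpr (fun z hz => by simp [hr z hz])
    have h2 : (xs.dropWhile q).filter (fun z => pvSev z == pvSev x) = [] :=
      List.filter_eq_nil_iff.mpr (fun z hz => by
        simp only [beq_iff_eq]
        exact fun e => absurd (hrest_gt z hz) (by rw [e]; exact lt_irrefl _))
    congr 1
    · -- head group
      congr 1
      have hfil : xs.filter (fun z => pvSev z == pvSev x) = xs.takeWhile q := by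
        conv_lhs => rw [← hxs]
        rw [List.filter_append, h1, h2, List.append_nil]
      rw [List.filter_cons_of_pos (by simp), hfil]
    · -- tail groups
      apply List.map_congr_left
      intro s hs
      rcases List.mem_map.mp ((PySem.Set.mem_ofList _ _).mp hs) with ⟨z, hz, rfl⟩
      have hlt : pvSev x < pvSev z := hrest_gt z hz
      congr 1
      have h1' : (xs.takeWhile q).filter (fun w => pvSev w == pvSev z) = [] :=
        List.filter_eq_nil_iff.mpr (fun w hw => by
          simp only [beq_iff_eq]
          rw [hr w hw]
          exact fun e => absurd hlt (by rw [e]; exact lt_irrefl _))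
      have hfil : xs.filter (fun w => pvSev w == pvSev z) = (xs.dropWhile q).filter (fun w => pvSev w == pvSev z) := by
        conv_lhs => rw [← hxs]
        rw [List.filter_append, h1', List.nil_append]
      rw [List.filter_cons_of_neg (by simp; exact ne_of_lt hlt), hfil]

lemma pv_main (l : List (List (String × String))) :
    PySem.List.sorted
      ((l.foldl (fun d issue =>
          let severity := pvSev issue
          let d := if d.contains severity then d else d.insert severity []
          d.insert severity (d.getD severity [] ++ [issue])) PySem.Dict.empty).items)
      (fun p => p.1)
    = pvRuns (PySem.List.sorted l pvSev) := by
  rw [pv_runs_eq (PySem.List.sorted l pvSev) (PySem.List.sorted_pairwise l pvSev)]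
  have hg : (fun s => (s, (PySem.List.sorted l pvSev).filter (fun x => pvSev x == s)))
      = (fun s : String => (s, l.filter (fun x => pvSev x == s))) :=
    funext fun s => by rw [pv_filter_sorted]
  rw [hg]
  apply PySem.List.sorted_eq_of_perm_of_pairwise_lt
  · rw [pv_dict_items]
    apply List.Perm.map
    rw [List.perm_ext_iff_of_nodup (PySem.Set.nodup_ofList _) (PySem.Set.nodup_ofList _)]
    intro a
    rw [PySem.Set.mem_ofList, PySem.Set.mem_ofList]
    exact ((PySem.List.sorted_perm l pvSev false).map pvSev).mem_iff
  · rw [List.pairwise_map]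
    have h1 : ((PySem.Set.ofList ((PySem.List.sorted l pvSev).map pvSev))).Pairwise (· ≤ ·) :=
      (PySem.List.sorted_map_key_pairwise l pvSev).sublist
        (pv_ofList_sublist ((PySem.List.sorted l pvSev).map pvSev))
    have h2 : ((PySem.Set.ofList ((PySem.List.sorted l pvSev).map pvSev))).Pairwise (· ≠ ·) :=
      PySem.Set.nodup_ofList _
    exact (h1.and h2).imp (fun ⟨ha, hb⟩ => lt_of_le_of_ne ha hb)

-- ===== VERDICT (by name: the statement is the Claim_ definition above) =====
theorem format_issues_summary_py_spec : Claim_equal_format_issues_summary_py := by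
  intro issues _
  unfold Spec_format_issues_summary_py
  unfold format_issues_summary_py format_issues_summary_py_alt
  by_cases h0 : issues = []
  · simp [h0]
  · simp only [h0, if_false, pv_main]
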